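-- pv_equiv track=rewrite | github.com/Steffen568/slatehub | compute_ownership.py | canonical_pos
-- ===== SOURCE A (Python) =====
-- POSITION_PRIORITY = ['C', 'SS', '2B', '3B', '1B', 'OF', 'SP']
--
-- def canonical_pos(dk_position_str):
--     """
--     Map DK multi-position string to single canonical position.
--     '2B/SS' → 'SS' (scarcer), '1B/3B' → '3B', etc.
--     Returns None if unrecognized.
--     """
--     if not dk_position_str:
--         return None
--     parts = [p.strip() for p in str(dk_position_str).split('/')]
--     for p in POSITION_PRIORITY:
--         if p in parts:
--             return p
--     return parts[0] if parts else None
-- ===== SOURCE B (Python) =====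
-- POSITION_PRIORITY = ['C', 'SS', '2B', '3B', '1B', 'OF', 'SP']
-- _RANK = {p: i for i, p in enumerate(POSITION_PRIORITY)}
--
--
-- def canonical_pos(dk_position_str):
--     """
--     Map DK multi-position string to single canonical position.
--     Single pass over the parts, picking the token of minimal priority rank;
--     unmatched tokens all rank past the end, so min's first-wins tie rule
--     yields parts[0] when nothing matches.
--     """
--     if not dk_position_str:
--         return None
--     parts = [p.strip() for p in str(dk_position_str).split('/')]
--     return min(parts, key=lambda p: _RANK.get(p, len(POSITION_PRIORITY)))
-- ===== Notes on version B (the rewrite author's own statement) =====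
-- stated objective: alternative
-- what changed: Instead of scanning the priority list and testing membership in parts, B builds a rank index from POSITION_PRIORITY once and makes a single min-selection pass over the parts, relying on min's first-wins tie rule for the unmatched fallback.
import Mathlib
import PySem

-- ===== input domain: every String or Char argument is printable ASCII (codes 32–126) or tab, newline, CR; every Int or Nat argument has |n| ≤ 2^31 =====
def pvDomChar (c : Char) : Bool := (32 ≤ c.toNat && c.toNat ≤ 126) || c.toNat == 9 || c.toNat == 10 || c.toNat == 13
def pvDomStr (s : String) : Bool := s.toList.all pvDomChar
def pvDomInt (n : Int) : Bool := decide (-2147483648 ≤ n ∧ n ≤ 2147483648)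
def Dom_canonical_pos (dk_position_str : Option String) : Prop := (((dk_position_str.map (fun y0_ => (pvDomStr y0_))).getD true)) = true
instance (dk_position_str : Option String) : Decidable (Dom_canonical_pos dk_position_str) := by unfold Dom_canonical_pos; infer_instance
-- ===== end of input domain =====

-- B replaces A's scan over the priority list (one membership test of parts per priority)
-- by a single min-selection pass over the parts under a precomputed rank index.

-- ===== PORT A =====
def POSITION_PRIORITY : List String := ["C", "SS", "2B", "3B", "1B", "OF", "SP"]

-- the 'for p in POSITION_PRIORITY' loop, including the fallthrough 'return parts[0] if parts else None'
def canonicalLoop (parts : List String) : List String → Option String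
  | [] => match parts with
          | [] => none
          | x :: _ => some x
  | p :: rest => if parts.contains p then some p else canonicalLoop parts rest

def canonical_pos (dk_position_str : Option String) : Option String :=
  match dk_position_str with
  | none => none
  | some s =>
    if s = "" then none  -- 'if not dk_position_str' (falsy: None or the empty string)
    else
      -- sep is the literal "/" (never ""), so split? is always some; getD [] is unreachable
      let parts := ((PySem.Str.split? s "/").getD []).map PySem.Str.strip
      canonicalLoop parts POSITION_PRIORITY

-- ===== PORT B =====
-- _RANK = {p: i for i, p in enumerate(POSITION_PRIORITY)}
def RANK : PySem.Dict String Int :=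
  (PySem.List.enumerate POSITION_PRIORITY).foldl
    (fun d iv => d.insert iv.2 iv.1) PySem.Dict.empty

def canonical_pos_alt (dk_position_str : Option String) : Option String :=
  match dk_position_str with
  | none => none
  | some s =>
    if s = "" then none
    else
      let parts := ((PySem.Str.split? s "/").getD []).map PySem.Str.strip
      -- min(parts, key=lambda p: _RANK.get(p, len(POSITION_PRIORITY)))
      PySem.List.min? parts (fun p => RANK.getD p (POSITION_PRIORITY.length : Int))

-- ===== PRECONDITION & SPEC =====
def Spec_canonical_pos (dk_position_str : Option String) (out : Option String) : Prop := out = canonical_pos_alt dk_position_str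
instance (dk_position_str : Option String) (out : Option String) : Decidable (Spec_canonical_pos dk_position_str out) := by unfold Spec_canonical_pos; infer_instance

-- ===== CLAIM (what is proved, stated in full; the proofs are below) =====
def Claim_equal_canonical_pos : Prop := ∀ (dk_position_str : Option String), Dom_canonical_pos dk_position_str → Spec_canonical_pos dk_position_str (canonical_pos dk_position_str)

-- ===== LEMMAS AND PROOFS =====

-- B's key function, written out as an if-chain (proof-side characterisation of the RANK lookup)
def kf (p : String) : Int :=
  if p = "C" then 0 else if p = "SS" then 1 else if p = "2B" then 2 else
  if p = "3B" then 3 else if p = "1B" then 4 else if p = "OF" then 5 else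
  if p = "SP" then 6 else 7

theorem kf_cases (q : String) :
    (q = "C" ∧ kf q = 0) ∨ (q = "SS" ∧ kf q = 1) ∨ (q = "2B" ∧ kf q = 2) ∨
    (q = "3B" ∧ kf q = 3) ∨ (q = "1B" ∧ kf q = 4) ∨ (q = "OF" ∧ kf q = 5) ∨
    (q = "SP" ∧ kf q = 6) ∨ kf q = 7 := by
  unfold kf
  split_ifs with h1 h2 h3 h4 h5 h6 h7 <;> simp_all

theorem kf_inj (a b : String) (h : kf a = kf b) (hlt : kf a < 7) : a = b := by
  rcases kf_cases a with ⟨rfl,ha⟩|⟨rfl,ha⟩|⟨rfl,ha⟩|⟨rfl,ha⟩|⟨rfl,ha⟩|⟨rfl,ha⟩|⟨rfl,ha⟩|ha <;>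
  rcases kf_cases b with ⟨rfl,hb⟩|⟨rfl,hb⟩|⟨rfl,hb⟩|⟨rfl,hb⟩|⟨rfl,hb⟩|⟨rfl,hb⟩|⟨rfl,hb⟩|hb <;>
  simp_all

theorem key_eq (p : String) :
    RANK.getD p ((POSITION_PRIORITY.length : Int)) = kf p := by
  have hR : RANK = PySem.Dict.mk
      [("C",0),("SS",1),("2B",2),("3B",3),("1B",4),("OF",5),("SP",6)] := by decide
  rcases kf_cases p with ⟨rfl,h⟩|⟨rfl,h⟩|⟨rfl,h⟩|⟨rfl,h⟩|⟨rfl,h⟩|⟨rfl,h⟩|⟨rfl,h⟩|h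
  · rw [h]; decide
  · rw [h]; decide
  · rw [h]; decide
  · rw [h]; decide
  · rw [h]; decide
  · rw [h]; decide
  · rw [h]; decide
  · have ne : ∀ q ∈ ["C","SS","2B","3B","1B","OF","SP"], q ≠ p := by
      intro q hq e
      rw [← e] at h
      fin_cases hq <;> exact absurd h (by decide)
    rw [h, hR]
    simp [PySem.Dict.getD, PySem.Dict.get?,
      ne "C" (by simp), ne "SS" (by simp), ne "2B" (by simp), ne "3B" (by simp),
      ne "1B" (by simp), ne "OF" (by simp), ne "SP" (by simp), POSITION_PRIORITY]

-- the matched case: p is in parts, nothing of smaller rank is ⇒ min? picks exactly p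
theorem min_eq_of_priority (parts : List String) (p : String)
    (hp : kf p < 7) (hmem : p ∈ parts)
    (habs : ∀ q ∈ parts, ¬ kf q < kf p) :
    PySem.List.min? parts kf = some p := by
  obtain ⟨m, hm⟩ : ∃ m, PySem.List.min? parts kf = some m := by
    cases h : PySem.List.min? parts kf with
    | none =>
      rw [PySem.List.min?_eq_none_iff] at h
      exact absurd hmem (h ▸ List.not_mem_nil)
    | some m => exact ⟨m, rfl⟩
  have hmmem : m ∈ parts := PySem.List.min?_mem hm
  have hle : kf m ≤ kf p := PySem.List.min?_isMin hm p hmem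
  have heq : kf m = kf p := le_antisymm hle (not_lt.mp (habs m hmmem))
  rw [hm, kf_inj m p heq (heq ▸ hp)]

-- the all-unmatched case: all keys equal ⇒ the first-wins fold keeps the head
theorem foldl_min_const {α : Type} (key : α → Int) (t : List α) (a : α)
    (h : ∀ y ∈ t, ¬ key y < key a) :
    t.foldl (fun acc x => match acc with
      | none => some x
      | some m => if key x < key m then some x else some m) (some a) = some a := by
  induction t with
  | nil => rfl
  | cons y t ih =>
    simp only [List.foldl_cons]
    rw [if_neg (h y (by simp))]
    exact ih (fun z hz => h z (by simp [hz]))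

theorem min_eq_of_no_priority (parts : List String)
    (hall : ∀ y ∈ parts, kf y = 7) :
    PySem.List.min? parts kf = parts.head? := by
  cases parts with
  | nil => rfl
  | cons x t =>
    simp only [PySem.List.min?, List.foldl_cons, List.head?]
    exact foldl_min_const kf t x (by
      intro y hy
      rw [hall y (by simp [hy]), hall x (by simp)]
      omega)

theorem loop_eq_min (parts : List String) :
    canonicalLoop parts POSITION_PRIORITY = PySem.List.min? parts kf := by
  simp only [POSITION_PRIORITY, canonicalLoop]
  by_cases h0 : "C" ∈ parts
  · rw [if_pos (by simpa using h0), min_eq_of_priority parts "C" (by decide) h0 ?_]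
    intro q hq hlt
    rcases kf_cases q with ⟨rfl,hk⟩|⟨rfl,hk⟩|⟨rfl,hk⟩|⟨rfl,hk⟩|⟨rfl,hk⟩|⟨rfl,hk⟩|⟨rfl,hk⟩|hk <;>
      rw [hk] at hlt <;> exact absurd hlt (by decide)
  by_cases h1 : "SS" ∈ parts
  · rw [if_neg (by simpa using h0), if_pos (by simpa using h1),
      min_eq_of_priority parts "SS" (by decide) h1 ?_]
    intro q hq hlt
    rcases kf_cases q with ⟨rfl,hk⟩|⟨rfl,hk⟩|⟨rfl,hk⟩|⟨rfl,hk⟩|⟨rfl,hk⟩|⟨rfl,hk⟩|⟨rfl,hk⟩|hk <;>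
      first
      | exact h0 hq
      | (rw [hk] at hlt; exact absurd hlt (by decide))
  by_cases h2 : "2B" ∈ parts
  · rw [if_neg (by simpa using h0), if_neg (by simpa using h1), if_pos (by simpa using h2),
      min_eq_of_priority parts "2B" (by decide) h2 ?_]
    intro q hq hlt
    rcases kf_cases q with ⟨rfl,hk⟩|⟨rfl,hk⟩|⟨rfl,hk⟩|⟨rfl,hk⟩|⟨rfl,hk⟩|⟨rfl,hk⟩|⟨rfl,hk⟩|hk <;>
      first
      | exact h0 hq
      | exact h1 hq
      | (rw [hk] at hlt; exact absurd hlt (by decide))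
  by_cases h3 : "3B" ∈ parts
  · rw [if_neg (by simpa using h0), if_neg (by simpa using h1), if_neg (by simpa using h2),
      if_pos (by simpa using h3), min_eq_of_priority parts "3B" (by decide) h3 ?_]
    intro q hq hlt
    rcases kf_cases q with ⟨rfl,hk⟩|⟨rfl,hk⟩|⟨rfl,hk⟩|⟨rfl,hk⟩|⟨rfl,hk⟩|⟨rfl,hk⟩|⟨rfl,hk⟩|hk <;>
      first
      | exact h0 hq
      | exact h1 hq
      | exact h2 hq
      | (rw [hk] at hlt; exact absurd hlt (by decide))
  by_cases h4 : "1B" ∈ parts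
  · rw [if_neg (by simpa using h0), if_neg (by simpa using h1), if_neg (by simpa using h2),
      if_neg (by simpa using h3), if_pos (by simpa using h4),
      min_eq_of_priority parts "1B" (by decide) h4 ?_]
    intro q hq hlt
    rcases kf_cases q with ⟨rfl,hk⟩|⟨rfl,hk⟩|⟨rfl,hk⟩|⟨rfl,hk⟩|⟨rfl,hk⟩|⟨rfl,hk⟩|⟨rfl,hk⟩|hk <;>
      first
      | exact h0 hq
      | exact h1 hq
      | exact h2 hq
      | exact h3 hq
      | (rw [hk] at hlt; exact absurd hlt (by decide))
  by_cases h5 : "OF" ∈ parts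
  · rw [if_neg (by simpa using h0), if_neg (by simpa using h1), if_neg (by simpa using h2),
      if_neg (by simpa using h3), if_neg (by simpa using h4), if_pos (by simpa using h5),
      min_eq_of_priority parts "OF" (by decide) h5 ?_]
    intro q hq hlt
    rcases kf_cases q with ⟨rfl,hk⟩|⟨rfl,hk⟩|⟨rfl,hk⟩|⟨rfl,hk⟩|⟨rfl,hk⟩|⟨rfl,hk⟩|⟨rfl,hk⟩|hk <;>
      first
      | exact h0 hq
      | exact h1 hq
      | exact h2 hq
      | exact h3 hq
      | exact h4 hq
      | (rw [hk] at hlt; exact absurd hlt (by decide))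
  by_cases h6 : "SP" ∈ parts
  · rw [if_neg (by simpa using h0), if_neg (by simpa using h1), if_neg (by simpa using h2),
      if_neg (by simpa using h3), if_neg (by simpa using h4), if_neg (by simpa using h5),
      if_pos (by simpa using h6), min_eq_of_priority parts "SP" (by decide) h6 ?_]
    intro q hq hlt
    rcases kf_cases q with ⟨rfl,hk⟩|⟨rfl,hk⟩|⟨rfl,hk⟩|⟨rfl,hk⟩|⟨rfl,hk⟩|⟨rfl,hk⟩|⟨rfl,hk⟩|hk <;>
      first
      | exact h0 hq
      | exact h1 hq
      | exact h2 hq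
      | exact h3 hq
      | exact h4 hq
      | exact h5 hq
      | (rw [hk] at hlt; exact absurd hlt (by decide))
  · have hall : ∀ y ∈ parts, kf y = 7 := by
      intro y hy
      rcases kf_cases y with ⟨rfl,hk⟩|⟨rfl,hk⟩|⟨rfl,hk⟩|⟨rfl,hk⟩|⟨rfl,hk⟩|⟨rfl,hk⟩|⟨rfl,hk⟩|hk <;>
        first
        | exact absurd hy h0
        | exact absurd hy h1
        | exact absurd hy h2
        | exact absurd hy h3
        | exact absurd hy h4
        | exact absurd hy h5
        | exact absurd hy h6
        | exact hk
    rw [if_neg (by simpa using h0), if_neg (by simpa using h1), if_neg (by simpa using h2),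
      if_neg (by simpa using h3), if_neg (by simpa using h4), if_neg (by simpa using h5),
      if_neg (by simpa using h6), min_eq_of_no_priority parts hall]
    cases parts <;> rfl

-- ===== VERDICT (by name: the statement is the Claim_ definition above) =====
theorem canonical_pos_spec : Claim_equal_canonical_pos := by
  intro d _
  unfold Spec_canonical_pos
  cases d with
  | none => rfl
  | some s =>
    by_cases hs : s = ""
    · simp only [canonical_pos, canonical_pos_alt, if_pos hs]
    · simp only [canonical_pos, canonical_pos_alt, if_neg hs]
      have hk : (fun p => RANK.getD p ((POSITION_PRIORITY.length : Int))) = kf :=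
        funext key_eq
      rw [hk, loop_eq_min]
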